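-- pv_equiv track=rewrite | github.com/Hemish123/msme-backend | apps/excel_upload/parsers.py | heuristic_column_mapping
-- ===== SOURCE A (Python) =====
-- def heuristic_column_mapping(columns):
--     """
--     Attempt to auto-detect column mappings using keyword matching.
--     Returns a dict mapping detected columns to standard field names.
--     """
--     mapping = {}
--     columns_lower = {col: col.lower().replace('_', ' ').replace('-', ' ') for col in columns}
--
--     patterns = {
--         'customer_name': ['customer name', 'customer', 'client name', 'client', 'party name',
--                         'party', 'buyer name', 'buyer', 'name'],
--         'invoice_number': ['invoice number', 'invoice no', 'invoice #', 'invoice id',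
--                          'bill number', 'bill no', 'inv no', 'invoice'],
--         'invoice_date': ['invoice date', 'bill date', 'inv date', 'date of invoice'],
--         'due_date': ['due date', 'payment due', 'due by', 'payment date due'],
--         'amount': ['amount', 'invoice amount', 'total amount', 'bill amount',
--                   'invoice value', 'total', 'value'],
--         'paid_amount': ['paid amount', 'amount paid', 'payment amount', 'received amount',
--                       'paid', 'payment received', 'amount received'],
--         'paid_date': ['paid date', 'payment date', 'date paid', 'received date',
--                     'date of payment', 'payment received date'],
--     }
--
--     for standard_field, keywords in patterns.items():
--         for col, col_lower in columns_lower.items():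
--             if col_lower in keywords or any(kw in col_lower for kw in keywords):
--                 if standard_field not in mapping:
--                     mapping[standard_field] = col
--                     break
--
--     return mapping
-- ===== SOURCE B (Python) =====
-- def heuristic_column_mapping(columns):
--     """
--     Auto-detect column mappings, column-major: one pass over the columns
--     builds a table column -> matching standard fields, then each field is
--     resolved to the first column whose table entry contains it.
--     """
--     patterns = {
--         'customer_name': ['customer name', 'customer', 'client name', 'client', 'party name',
--                         'party', 'buyer name', 'buyer', 'name'],
--         'invoice_number': ['invoice number', 'invoice no', 'invoice #', 'invoice id',
--                          'bill number', 'bill no', 'inv no', 'invoice'],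
--         'invoice_date': ['invoice date', 'bill date', 'inv date', 'date of invoice'],
--         'due_date': ['due date', 'payment due', 'due by', 'payment date due'],
--         'amount': ['amount', 'invoice amount', 'total amount', 'bill amount',
--                   'invoice value', 'total', 'value'],
--         'paid_amount': ['paid amount', 'amount paid', 'payment amount', 'received amount',
--                       'paid', 'payment received', 'amount received'],
--         'paid_date': ['paid date', 'payment date', 'date paid', 'received date',
--                     'date of payment', 'payment received date'],
--     }
--
--     table = []
--     for col in columns:
--         norm = col.lower().replace('_', ' ').replace('-', ' ')
--         table.append((col, [f for f, kws in patterns.items()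
--                             if any(kw in norm for kw in kws)]))
--
--     mapping = {}
--     for f in patterns:
--         hit = next((col for col, fields in table if f in fields), None)
--         if hit is not None:
--             mapping[f] = hit
--     return mapping
-- ===== Notes on version B (the rewrite author's own statement) =====
-- stated objective: alternative
-- what changed: Field-major repeated scanning of the columns dict is replaced by one column-major pass that builds a table mapping each column to the standard fields its keywords match (dropping A's redundant exact-equality membership test), followed by a per-field resolution pass taking the first column whose table entry contains the field.
import Mathlib
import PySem

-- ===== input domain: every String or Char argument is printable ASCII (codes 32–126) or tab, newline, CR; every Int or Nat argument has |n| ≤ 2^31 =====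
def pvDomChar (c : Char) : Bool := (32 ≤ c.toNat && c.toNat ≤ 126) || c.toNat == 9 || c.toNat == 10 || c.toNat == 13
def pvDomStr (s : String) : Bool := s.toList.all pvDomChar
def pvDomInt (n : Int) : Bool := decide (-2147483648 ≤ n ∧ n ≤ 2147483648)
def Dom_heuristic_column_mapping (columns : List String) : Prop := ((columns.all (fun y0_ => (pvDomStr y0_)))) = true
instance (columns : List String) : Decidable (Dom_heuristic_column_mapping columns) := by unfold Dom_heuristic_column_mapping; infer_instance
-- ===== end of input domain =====

-- B replaces A's field-major repeated scans by one column-major pass that indexes each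
-- column with its matching fields, then a per-field resolution pass over that table
-- (alternative decomposition, same asymptotic cost).

-- ===== PORT A =====
-- the literal `patterns` dict, in insertion order (shared by both ports)
def pvPatterns : List (String × List String) := [
  ("customer_name", ["customer name", "customer", "client name", "client", "party name",
                     "party", "buyer name", "buyer", "name"]),
  ("invoice_number", ["invoice number", "invoice no", "invoice #", "invoice id",
                      "bill number", "bill no", "inv no", "invoice"]),
  ("invoice_date", ["invoice date", "bill date", "inv date", "date of invoice"]),
  ("due_date", ["due date", "payment due", "due by", "payment date due"]),
  ("amount", ["amount", "invoice amount", "total amount", "bill amount",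
              "invoice value", "total", "value"]),
  ("paid_amount", ["paid amount", "amount paid", "payment amount", "received amount",
                   "paid", "payment received", "amount received"]),
  ("paid_date", ["paid date", "payment date", "date paid", "received date",
                 "date of payment", "payment received date"])]

-- col.lower().replace('_', ' ').replace('-', ' ')  (both Pythons normalise identically)
def pvNorm (col : String) : String :=
  PySem.Str.replace (PySem.Str.replace (PySem.Str.lower col) "_" " ") "-" " "

-- A's inner `for col, col_lower in columns_lower.items(): … break` loop
def pvLoopA (sf : String) (kws : List String) :
    List (String × String) → PySem.Dict String String → PySem.Dict String String
  | [], m => m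
  | (col, cl) :: rest, m =>
      if kws.contains cl || kws.any (fun kw => PySem.Str.isIn kw cl) then
        if m.contains sf then pvLoopA sf kws rest m
        else m.insert sf col   -- mapping[standard_field] = col; break
      else pvLoopA sf kws rest m

def heuristic_column_mapping (columns : List String) : List (String × String) :=
  let columns_lower : PySem.Dict String String :=
    columns.foldl (fun d col => d.insert col (pvNorm col)) PySem.Dict.empty
  (pvPatterns.foldl (fun m p => pvLoopA p.1 p.2 columns_lower.items m)
      PySem.Dict.empty).items

-- ===== PORT B =====
-- the fields of `patterns` whose keyword list matches the normalised column
def pvFields (norm : String) : List String :=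
  (pvPatterns.filter (fun p => p.2.any (fun kw => PySem.Str.isIn kw norm))).map Prod.fst

def heuristic_column_mapping_alt (columns : List String) : List (String × String) :=
  let table := columns.map (fun col => (col, pvFields (pvNorm col)))
  (pvPatterns.foldl (fun m p =>
      match table.find? (fun q => q.2.contains p.1) with
      | some q => m.insert p.1 q.1
      | none => m) PySem.Dict.empty).items

-- ===== PRECONDITION & SPEC =====
def Spec_heuristic_column_mapping (columns : List String) (out : List (String × String)) : Prop := out = heuristic_column_mapping_alt columns
instance (columns : List String) (out : List (String × String)) : Decidable (Spec_heuristic_column_mapping columns out) := by unfold Spec_heuristic_column_mapping; infer_instance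

-- ===== CLAIM (what is proved, stated in full; the proofs are below) =====
def Claim_equal_heuristic_column_mapping : Prop := ∀ (columns : List String), Dom_heuristic_column_mapping columns → Spec_heuristic_column_mapping columns (heuristic_column_mapping columns)

-- ===== LEMMAS AND PROOFS =====

-- A's inner loop finds the first matching dict item (the field is never already mapped)
lemma pvLoopA_eq (sf : String) (kws : List String) (items : List (String × String))
    (m : PySem.Dict String String) (hm : m.contains sf = false) :
    pvLoopA sf kws items m =
      match items.find? (fun q => kws.contains q.2 || kws.any (fun kw => PySem.Str.isIn kw q.2)) with
      | some q => m.insert sf q.1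
      | none => m := by
  induction items with
  | nil => simp [pvLoopA]
  | cons q rest ih =>
    obtain ⟨col, cl⟩ := q
    by_cases hq : (kws.contains cl || kws.any (fun kw => PySem.Str.isIn kw cl)) = true
    · rw [List.find?_cons_of_pos (by simpa using hq)]
      simp only [pvLoopA]
      rw [if_pos hq, if_neg (by simp [hm])]
    · rw [List.find?_cons_of_neg (by simpa using hq)]
      simp only [pvLoopA]
      rw [if_neg hq]
      exact ih

-- the dict comprehension's items are the first-occurrence columns paired with their norms
lemma pvItems_fold (cols : List String) (s : List String) (d : PySem.Dict String String)
    (h : d.items = s.map (fun c => (c, pvNorm c))) :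
    (cols.foldl (fun d col => d.insert col (pvNorm col)) d).items
      = (cols.foldl PySem.Set.add s).map (fun c => (c, pvNorm c)) := by
  induction cols generalizing s d with
  | nil => simpa using h
  | cons col rest ih =>
    have hdc : d.contains col = PySem.Set.contains s col := by
      rw [Bool.eq_iff_iff]
      simp [PySem.Dict.contains, h, List.any_eq_true, PySem.Set.contains]
    by_cases hc : PySem.Set.contains s col = true
    · have h' : (d.insert col (pvNorm col)).items = s.map (fun c => (c, pvNorm c)) := by
        rw [PySem.Dict.items_insert, if_pos (hdc.trans hc), h, List.map_map]
        refine List.map_congr_left (fun c _ => ?_)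
        by_cases hcc : c = col <;> simp [hcc]
      simp only [List.foldl_cons, PySem.Set.add, if_pos hc]
      exact ih s _ h'
    · have h' : (d.insert col (pvNorm col)).items = (s ++ [col]).map (fun c => (c, pvNorm c)) := by
        rw [PySem.Dict.items_insert, if_neg (by rw [hdc]; simpa using hc), h]
        simp
      simp only [List.foldl_cons, PySem.Set.add, if_neg hc]
      exact ih (s ++ [col]) _ h'

-- the first match in the deduplicated column list is the first match in the list itself
lemma pvFind_foldl_add (p : String → Bool) (cols s : List String) :
    (cols.foldl PySem.Set.add s).find? p = (s.find? p).or (cols.find? p) := by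
  induction cols generalizing s with
  | nil => simp
  | cons col rest ih =>
    simp only [List.foldl_cons, PySem.Set.add]
    by_cases hc : PySem.Set.contains s col = true
    · rw [if_pos hc, ih]
      cases hfs : s.find? p with
      | some x => simp
      | none =>
        have hcol : p col = false := by
          have := List.find?_eq_none.mp hfs col
            (by simpa [PySem.Set.contains, List.contains_iff_mem] using hc)
          simpa using this
        simp [hcol]
    · rw [if_neg hc, ih, List.find?_append]
      by_cases hp : p col = true <;>
        simp [hp]

-- fields of `patterns` have no duplicates
lemma pvNodup : (pvPatterns.map Prod.fst).Nodup := by decide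

-- A's per-item predicate agrees with membership of the field in B's table entry
lemma pvPred_eq (sf : String) (kws : List String) (h : (sf, kws) ∈ pvPatterns) (n : String) :
    (kws.contains n || kws.any (fun kw => PySem.Str.isIn kw n))
      = (pvFields n).contains sf := by
  have habs : kws.contains n = true → kws.any (fun kw => PySem.Str.isIn kw n) = true := by
    intro hcn
    refine List.any_eq_true.mpr ⟨n, List.contains_iff_mem.mp hcn, ?_⟩
    exact (PySem.Str.isIn_iff_infix n n).mpr (List.infix_refl _)
  have hmain : kws.any (fun kw => PySem.Str.isIn kw n) = (pvFields n).contains sf := by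
    rw [Bool.eq_iff_iff]
    constructor
    · intro hany
      refine List.contains_iff_mem.mpr ?_
      exact List.mem_map.mpr ⟨(sf, kws), List.mem_filter.mpr ⟨h, hany⟩, rfl⟩
    · intro hcon
      obtain ⟨p, hp, hfst⟩ := List.mem_map.mp (List.contains_iff_mem.mp hcon)
      obtain ⟨hpP, hq⟩ := List.mem_filter.mp hp
      have : p = (sf, kws) := List.inj_on_of_nodup_map pvNodup hpP h hfst
      rwa [this] at hq
  cases hcn : kws.contains n with
  | false => simpa [hcn] using hmain
  | true => rw [← hmain, habs hcn]; rfl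

-- one outer-loop step of A equals one outer-loop step of B
set_option maxHeartbeats 1000000 in
lemma pvStep_eq (columns : List String) (sf : String) (kws : List String)
    (h : (sf, kws) ∈ pvPatterns) (m : PySem.Dict String String)
    (hm : m.contains sf = false) :
    pvLoopA sf kws
        (columns.foldl (fun d col => d.insert col (pvNorm col)) PySem.Dict.empty).items m
      = match (columns.map (fun col => (col, pvFields (pvNorm col)))).find?
              (fun q => q.2.contains sf) with
        | some q => m.insert sf q.1
        | none => m := by
  rw [pvLoopA_eq sf kws _ m hm]
  rw [pvItems_fold columns [] PySem.Dict.empty (by simp [PySem.Dict.empty])]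
  rw [List.find?_map, List.find?_map]
  have : (fun q => kws.contains q.2 || kws.any (fun kw => PySem.Str.isIn kw q.2)) ∘
          (fun c => (c, pvNorm c))
        = (fun q => q.2.contains sf) ∘ (fun col => (col, pvFields (pvNorm col))) := by
    funext c
    simp only [Function.comp_apply]
    exact pvPred_eq sf kws h (pvNorm c)
  rw [this, pvFind_foldl_add _ columns []]
  cases columns.find? ((fun q => q.2.contains sf) ∘ fun col => (col, pvFields (pvNorm col))) <;> simp

-- the two outer folds agree, over any suffix of the patterns with fresh distinct fields
lemma pvOuter (columns : List String) (ps : List (String × List String))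
    (hsub : ∀ p ∈ ps, p ∈ pvPatterns) (hnd : (ps.map Prod.fst).Nodup)
    (m : PySem.Dict String String) (hm : ∀ p ∈ ps, m.contains p.1 = false) :
    ps.foldl (fun m p => pvLoopA p.1 p.2
        (columns.foldl (fun d col => d.insert col (pvNorm col)) PySem.Dict.empty).items m) m
      = ps.foldl (fun m p =>
          match (columns.map (fun col => (col, pvFields (pvNorm col)))).find?
                (fun q => q.2.contains p.1) with
          | some q => m.insert p.1 q.1
          | none => m) m := by
  induction ps generalizing m with
  | nil => rfl
  | cons p rest ih =>
    obtain ⟨sf, kws⟩ := p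
    simp only [List.foldl_cons]
    rw [pvStep_eq columns sf kws (hsub _ (List.mem_cons_self ..)) m (hm _ (List.mem_cons_self ..))]
    have hnd' : (rest.map Prod.fst).Nodup := (List.nodup_cons.mp (by simpa using hnd)).2
    have hfresh : sf ∉ rest.map Prod.fst := (List.nodup_cons.mp (by simpa using hnd)).1
    refine ih (fun p hp => hsub p (List.mem_cons_of_mem _ hp)) hnd' _ (fun p' hp' => ?_)
    have hne : p'.1 ≠ sf := fun he => hfresh (he ▸ List.mem_map_of_mem hp')
    cases hfind : (columns.map (fun col => (col, pvFields (pvNorm col)))).find?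
        (fun q => q.2.contains sf) with
    | none => exact hm p' (List.mem_cons_of_mem _ hp')
    | some q =>
      simp only
      rw [PySem.Dict.contains_insert]
      simp [hne, hm p' (List.mem_cons_of_mem _ hp')]

-- ===== VERDICT (by name: the statement is the Claim_ definition above) =====
theorem heuristic_column_mapping_spec : Claim_equal_heuristic_column_mapping := by
  intro columns _
  unfold Spec_heuristic_column_mapping heuristic_column_mapping heuristic_column_mapping_alt
  exact congrArg PySem.Dict.items
    (pvOuter columns pvPatterns (fun _ hp => hp) pvNodup PySem.Dict.empty
      (fun p _ => PySem.Dict.contains_empty p.1))
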